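-- pv_equiv track=rewrite | github.com/p4lang/p4-dpdk-target | src/bf_rt/bfruntime_grpc_client/python/info_parse.py | _generate_unique_names
-- ===== SOURCE A (Python) =====
-- def _generate_unique_names(input_name):
--     tokens = input_name.split(".")
--     name_list = set()
--     last_token = ""
--     for token in reversed(tokens):
--       if not last_token:
--         name_list.add(token)
--         last_token = token
--       else:
--         name_list.add(token+"."+last_token)
--         last_token = token+"."+last_token
--     return name_list
-- ===== SOURCE B (Python) =====
-- def _generate_unique_names(input_name):
--     tokens = input_name.split(".")
--     return {".".join(tokens[i:]) for i in range(len(tokens) - 1, -1, -1)}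
-- ===== Notes on version B (the rewrite author's own statement) =====
-- stated objective: simpler
-- what changed: B builds each dotted suffix independently with a slice-and-join comprehension over suffix start positions instead of A's reversed loop maintaining a running last_token accumulator and conditional reset.
-- intended difference: On names with a trailing dot (an empty final dot-separated token), A's accumulator resets on that empty token and returns the suffixes of the name with its trailing dot run dropped (e.g. 'a.' gives A {'', 'a'} but B {'', 'a.'}); B returns the true dotted-suffix set, the intended value for a suffix-set builder. — e.g. on _generate_unique_names("a."): A returns ["", "a"], B returns ["", "a."]
import Mathlib
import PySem

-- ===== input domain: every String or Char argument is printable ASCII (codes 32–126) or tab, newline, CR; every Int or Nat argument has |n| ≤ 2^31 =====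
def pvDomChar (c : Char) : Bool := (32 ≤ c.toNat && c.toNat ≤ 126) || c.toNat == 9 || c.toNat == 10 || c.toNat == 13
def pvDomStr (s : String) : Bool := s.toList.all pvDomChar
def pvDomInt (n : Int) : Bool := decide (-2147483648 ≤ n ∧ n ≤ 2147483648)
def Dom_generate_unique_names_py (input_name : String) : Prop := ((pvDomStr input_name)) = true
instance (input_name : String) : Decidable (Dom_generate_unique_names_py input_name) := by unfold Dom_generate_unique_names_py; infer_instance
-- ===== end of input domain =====

-- B replaces A's running last_token accumulator with an independent slice-and-join per suffix
-- start position (objective: simpler); on names with a trailing dot the two differ as stated at D_.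

-- ===== PORT A =====
-- loop body of A: state is (name_list, last_token); 'not last_token' is the empty-string test
def aStep (st : PySem.Set String × String) (token : String) : PySem.Set String × String :=
  if st.2 == "" then (PySem.Set.add st.1 token, token)
  else (PySem.Set.add st.1 (token ++ "." ++ st.2), token ++ "." ++ st.2)

def generate_unique_names_py (input_name : String) : List String :=
  let tokens : List String := (PySem.Chars.splitOn input_name.toList ['.']).map String.ofList
  (tokens.reverse.foldl aStep (PySem.Set.empty, "")).1

-- ===== PORT B =====
-- comprehension body of B: add ".".join(tokens[i:]) to the set
def bAdd (tokens : List String) (s : PySem.Set String) (i : Int) : PySem.Set String :=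
  PySem.Set.add s (PySem.Str.join "." (PySem.List.slice tokens (some i) none))

def generate_unique_names_py_alt (input_name : String) : List String :=
  let tokens : List String := (PySem.Chars.splitOn input_name.toList ['.']).map String.ofList
  (PySem.List.pyRange ((tokens.length : Int) - 1) (-1) (-1)).foldl (bAdd tokens) PySem.Set.empty

-- ===== PRECONDITION & SPEC =====
-- On names with a trailing dot (an empty final dot-separated token), A's accumulator resets on
-- that empty token and returns the suffixes of the name with its trailing dot run dropped
-- (e.g. 'a.' gives A {'', 'a'} but B {'', 'a.'}); B returns the true dotted-suffix set, the
-- intended value for a suffix-set builder.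
def D_generate_unique_names_py (input_name : String) : Prop :=
  PySem.Str.endswith input_name "." = true
instance (input_name : String) : Decidable (D_generate_unique_names_py input_name) := by
  unfold D_generate_unique_names_py; infer_instance

def Spec_generate_unique_names_py (input_name : String) (out : List String) : Prop :=
  ¬ D_generate_unique_names_py input_name → out = generate_unique_names_py_alt input_name
instance (input_name : String) (out : List String) : Decidable (Spec_generate_unique_names_py input_name out) := by
  unfold Spec_generate_unique_names_py; infer_instance

def pvDiffWitness_generate_unique_names_py : String := "a."
def pvDiffWitnessOut_generate_unique_names_py : (List String) × (List String) :=
  (["", "a"], ["", "a."])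

-- ===== CLAIM (what is proved, stated in full; the proofs are below) =====
def Claim_unchanged_generate_unique_names_py : Prop := ∀ (input_name : String), Dom_generate_unique_names_py input_name → Spec_generate_unique_names_py input_name (generate_unique_names_py input_name)
def Claim_changed_generate_unique_names_py : Prop := Dom_generate_unique_names_py (pvDiffWitness_generate_unique_names_py) ∧ D_generate_unique_names_py (pvDiffWitness_generate_unique_names_py) ∧ generate_unique_names_py (pvDiffWitness_generate_unique_names_py) = pvDiffWitnessOut_generate_unique_names_py.1 ∧ generate_unique_names_py_alt (pvDiffWitness_generate_unique_names_py) = pvDiffWitnessOut_generate_unique_names_py.2 ∧ pvDiffWitnessOut_generate_unique_names_py.1 ≠ pvDiffWitnessOut_generate_unique_names_py.2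

def Claim_exact_generate_unique_names_py : Prop := ∀ (input_name : String), Dom_generate_unique_names_py input_name → D_generate_unique_names_py input_name → generate_unique_names_py input_name ≠ generate_unique_names_py_alt input_name

-- ===== LEMMAS AND PROOFS =====

-- joins of the dot-separated suffixes of a token list, shortest suffix first
def sfxJoins : List String → List String
  | [] => []
  | t :: rest => sfxJoins rest ++ [PySem.Str.join "." (t :: rest)]

-- joins produced while stacking the elements of rs, one at a time, onto the suffix zs
def stkJoins : List String → List String → List String
  | _, [] => []
  | zs, r :: rest => PySem.Str.join "." (r :: zs) :: stkJoins (r :: zs) rest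

-- the strings A's loop adds when started with accumulator string l
def accAdds : String → List String → List String
  | _, [] => []
  | l, r :: rest => (r ++ "." ++ l) :: accAdds (r ++ "." ++ l) rest

lemma strJoin_singleton (p : String) : PySem.Str.join "." [p] = p :=
  String.toList_inj.mp (by simp [PySem.Str.toList_join, PySem.Chars.join_singleton])

lemma strJoin_cons_cons (p q : String) (rest : List String) :
    PySem.Str.join "." (p :: q :: rest) = p ++ "." ++ PySem.Str.join "." (q :: rest) := by
  apply String.toList_inj.mp
  simp [PySem.Str.toList_join, PySem.Chars.join_cons_cons]

lemma append_dot_ne_empty (a b : String) : a ++ "." ++ b ≠ "" := by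
  intro h; have := congrArg String.toList h; simp at this

lemma aStep_foldl (rs : List String) : ∀ (s : PySem.Set String) (l : String), l ≠ "" →
    rs.foldl aStep (s, l) =
      ((accAdds l rs).foldl PySem.Set.add s, rs.foldl (fun a r => r ++ "." ++ a) l) := by
  induction rs with
  | nil => intro s l hl; simp [accAdds]
  | cons r rest ih =>
    intro s l hl
    have hstep : aStep (s, l) r = (PySem.Set.add s (r ++ "." ++ l), r ++ "." ++ l) := by
      simp [aStep, hl]
    simp only [List.foldl_cons, hstep, accAdds]
    exact ih _ _ (append_dot_ne_empty r l)

lemma accAdds_eq_stkJoins (rs : List String) : ∀ zs : List String, zs ≠ [] →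
    accAdds (PySem.Str.join "." zs) rs = stkJoins zs rs := by
  induction rs with
  | nil => intro zs _; simp [accAdds, stkJoins]
  | cons r rest ih =>
    intro zs hz
    obtain ⟨z, zs', rfl⟩ := List.exists_cons_of_ne_nil hz
    simp only [accAdds, stkJoins]
    rw [← strJoin_cons_cons r z zs', ih (r :: z :: zs') (by simp)]

lemma stkJoins_append_singleton (rs : List String) : ∀ (zs : List String) (u : String),
    stkJoins zs (rs ++ [u]) = stkJoins zs rs ++ [PySem.Str.join "." (u :: rs.reverse ++ zs)] := by
  induction rs with
  | nil => intro zs u; simp [stkJoins]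
  | cons r rest ih =>
    intro zs u
    simp only [List.cons_append, stkJoins, ih (r :: zs) u]
    simp

lemma sfxJoins_append (us : List String) : ∀ zs : List String,
    sfxJoins (us ++ zs) = sfxJoins zs ++ stkJoins zs us.reverse := by
  induction us with
  | nil => intro zs; simp [stkJoins]
  | cons u us' ih =>
    intro zs
    simp only [List.cons_append, sfxJoins, ih zs, List.reverse_cons, stkJoins_append_singleton]
    simp

lemma sfxJoins_eq_map_range (ts : List String) :
    sfxJoins ts = (List.range ts.length).map
      (fun k => PySem.Str.join "." (ts.drop (ts.length - 1 - k))) := by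
  induction ts with
  | nil => simp [sfxJoins]
  | cons t rest ih =>
    simp only [sfxJoins, ih, List.length_cons, List.range_succ, List.map_append, List.map_cons,
      List.map_nil]
    congr 1
    · apply List.map_congr_left
      intro k hk
      rw [List.mem_range] at hk
      have h2 : rest.length + 1 - 1 - k = (rest.length - 1 - k) + 1 := by omega
      rw [h2, List.drop_succ_cons]
    · simp

-- B's fold adds the suffix joins, shortest first, into an empty set
lemma b_fold_eq (ts : List String) :
    (PySem.List.pyRange ((ts.length : Int) - 1) (-1) (-1)).foldl (bAdd ts) PySem.Set.empty =
      (sfxJoins ts).foldl PySem.Set.add PySem.Set.empty := by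
  rw [PySem.List.pyRange_neg_one]
  have h1 : ((ts.length : Int) - 1 - (-1)).toNat = ts.length := by omega
  rw [h1, List.foldl_map, sfxJoins_eq_map_range, List.foldl_map]
  apply PySem.List.foldl_congr_mem
  intro s k hk
  rw [List.mem_range] at hk
  have h0 : (0:Int) ≤ (ts.length : Int) - 1 - (k : Int) := by omega
  rw [bAdd, PySem.List.slice_from (ha := h0)]
  have h2 : ((ts.length : Int) - 1 - (k : Int)).toNat = ts.length - 1 - k := by omega
  rw [h2]

-- A's fold performs the same sequence of adds when the last token is nonempty
lemma a_fold_eq (us : List String) (t : String) (ht : t ≠ "") :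
    ((us ++ [t]).reverse.foldl aStep (PySem.Set.empty, "")).1 =
      (sfxJoins (us ++ [t])).foldl PySem.Set.add PySem.Set.empty := by
  have hacc : accAdds t us.reverse = stkJoins [t] us.reverse := by
    have := accAdds_eq_stkJoins us.reverse [t] (by simp)
    rwa [strJoin_singleton] at this
  have hstep : aStep (PySem.Set.empty, "") t = (PySem.Set.add PySem.Set.empty t, t) := by
    simp [aStep]
  rw [List.reverse_append, List.reverse_singleton, List.singleton_append, List.foldl_cons, hstep,
    aStep_foldl us.reverse _ t ht, sfxJoins_append us [t]]
  simp only [sfxJoins, strJoin_singleton, List.nil_append]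
  rw [List.foldl_append, hacc]
  rfl

-- splitOn.go with an empty remainder flushes the current chunk
lemma go_nil (fuel : Nat) (cur : List Char) (acc : List (List Char)) :
    PySem.Chars.splitOn.go ['.'] fuel [] cur acc = acc.reverse ++ [cur.reverse] := by
  cases fuel with
  | zero => rw [PySem.Chars.splitOn.go]; simp
  | succ n => rw [PySem.Chars.splitOn.go] <;> simp

-- the last chunk splitOn.go produces is nonempty when l is nonempty and does not end in '.'
lemma go_last (fuel : Nat) : ∀ (l cur : List Char) (acc : List (List Char)), l ≠ [] →
    l.getLast? ≠ some '.' →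
    ∃ us t, PySem.Chars.splitOn.go ['.'] fuel l cur acc = us ++ [t] ∧ t ≠ [] := by
  induction fuel with
  | zero =>
    intro l cur acc hl _
    rw [PySem.Chars.splitOn.go]
    exact ⟨acc.reverse, cur.reverse ++ l, by simp, by simp [hl]⟩
  | succ n ih =>
    intro l cur acc hl hlast
    obtain ⟨c, rest, rfl⟩ := List.exists_cons_of_ne_nil hl
    rw [PySem.Chars.splitOn.go]
    by_cases hp : (['.'] : List Char).isPrefixOf (c :: rest) = true
    · have hc : c = '.' := by have h' := hp; simp [List.isPrefixOf] at h'; exact h'.symm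
      rcases rest with _ | ⟨d, rest'⟩
      · exfalso; apply hlast; simp [hc]
      · have hlast' : (d :: rest').getLast? ≠ some '.' := by
          simpa [List.getLast?_cons_cons] using hlast
        simp only [hp, if_pos]
        simpa using ih (d :: rest') [] (cur.reverse :: acc) (by simp) hlast'
    · simp only [hp, if_false, Bool.false_eq_true]
      rcases rest with _ | ⟨d, rest'⟩
      · rw [go_nil]
        exact ⟨acc.reverse, (c :: cur).reverse, by simp, by simp⟩
      · have hlast' : (d :: rest').getLast? ≠ some '.' := by
          simpa [List.getLast?_cons_cons] using hlast
        exact ih (d :: rest') (c :: cur) acc (by simp) hlast'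

lemma splitOn_last (cs : List Char) (h : cs ≠ []) (h2 : cs.getLast? ≠ some '.') :
    ∃ us t, PySem.Chars.splitOn cs ['.'] = us ++ [t] ∧ t ≠ [] := by
  rw [PySem.Chars.splitOn]
  exact go_last _ cs [] [] h h2

lemma getLast?_suffix (l : List Char) (c : Char) (h : l.getLast? = some c) : [c] <:+ l := by
  have hne : l ≠ [] := by rintro rfl; simp at h
  have h2 := List.dropLast_append_getLast hne
  rw [List.getLast?_eq_some_getLast hne] at h
  simp at h
  exact ⟨l.dropLast, by rw [h] at h2; exact h2⟩

lemma join_append_singleton (s z : List Char) : ∀ (Y : List (List Char)), Y ≠ [] →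
    PySem.Chars.join s (Y ++ [z]) = PySem.Chars.join s Y ++ s ++ z := by
  intro Y
  induction Y with
  | nil => intro h; exact absurd rfl h
  | cons y Y' ih =>
    intro _
    rcases Y' with _ | ⟨w, W⟩
    · simp [PySem.Chars.join_cons_cons, PySem.Chars.join_singleton]
    · simp only [List.cons_append, PySem.Chars.join_cons_cons]
      rw [← List.cons_append, ih (by simp)]
      simp [List.append_assoc]

lemma join_snoc_append (s y z : List Char) (Y : List (List Char)) :
    PySem.Chars.join s (Y ++ [y ++ z]) = PySem.Chars.join s (Y ++ [y]) ++ z := by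
  rcases Y with _ | ⟨w, W⟩
  · simp [PySem.Chars.join_singleton]
  · rw [join_append_singleton s (y ++ z) _ (by simp), join_append_singleton s y _ (by simp)]
    simp [List.append_assoc]

lemma go_join (fuel : Nat) : ∀ (l cur : List Char) (acc : List (List Char)),
    PySem.Chars.join ['.'] (PySem.Chars.splitOn.go ['.'] fuel l cur acc) =
      PySem.Chars.join ['.'] (acc.reverse ++ [cur.reverse]) ++ l := by
  induction fuel with
  | zero =>
    intro l cur acc
    rw [PySem.Chars.splitOn.go]
    simp only [List.reverse_cons]
    rw [join_snoc_append]
  | succ n ih =>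
    intro l cur acc
    rcases l with _ | ⟨c, rest⟩
    · rw [go_nil]; simp
    · rw [PySem.Chars.splitOn.go]
      by_cases hp : (['.'] : List Char).isPrefixOf (c :: rest) = true
      · have hc : c = '.' := by have h' := hp; simp [List.isPrefixOf] at h'; exact h'.symm
        simp only [hp, if_pos, List.length_cons, List.length_nil, List.drop_succ_cons,
          List.drop_zero]
        rw [ih rest [] (cur.reverse :: acc)]
        simp only [List.reverse_nil, List.reverse_cons]
        rw [join_append_singleton ['.'] [] _ (by simp)]
        simp [hc]
      · simp only [hp, if_false, Bool.false_eq_true]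
        rw [ih rest (c :: cur) acc]
        simp only [List.reverse_cons]
        rw [join_snoc_append]
        simp

lemma splitOn_join (cs : List Char) :
    PySem.Chars.join ['.'] (PySem.Chars.splitOn cs ['.']) = cs := by
  rw [PySem.Chars.splitOn, go_join]
  simp [PySem.Chars.join_singleton]

lemma go_ne_nil (fuel : Nat) : ∀ (l cur : List Char) (acc : List (List Char)),
    PySem.Chars.splitOn.go ['.'] fuel l cur acc ≠ [] := by
  induction fuel with
  | zero => intro l cur acc; rw [PySem.Chars.splitOn.go]; simp
  | succ n ih =>
    intro l cur acc
    rcases l with _ | ⟨c, rest⟩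
    · rw [go_nil]; simp
    · rw [PySem.Chars.splitOn.go]
      by_cases hp : (['.'] : List Char).isPrefixOf (c :: rest) = true
      · simp only [hp, if_pos]; exact ih _ _ _
      · simp only [hp, if_false, Bool.false_eq_true]; exact ih _ _ _

lemma splitOn_ne_nil (cs : List Char) : PySem.Chars.splitOn cs ['.'] ≠ [] := by
  rw [PySem.Chars.splitOn]; exact go_ne_nil _ _ _ _

lemma go_nodot (fuel : Nat) : ∀ (l cur : List Char) (acc : List (List Char)),
    l.length < fuel → (∀ ch ∈ acc, '.' ∉ ch) → '.' ∉ cur →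
    ∀ ch ∈ PySem.Chars.splitOn.go ['.'] fuel l cur acc, '.' ∉ ch := by
  induction fuel with
  | zero => intro l cur acc h; omega
  | succ n ih =>
    intro l cur acc hlen hacc hcur
    rcases l with _ | ⟨c, rest⟩
    · rw [go_nil]
      intro ch hch
      rcases List.mem_append.mp hch with h | h
      · exact hacc ch (by simpa using h)
      · simp at h; subst h; simpa using hcur
    · rw [PySem.Chars.splitOn.go]
      by_cases hp : (['.'] : List Char).isPrefixOf (c :: rest) = true
      · simp only [hp, if_pos, List.length_cons, List.length_nil, List.drop_succ_cons,
          List.drop_zero]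
        apply ih rest [] (cur.reverse :: acc) (by simp at hlen; omega)
        · intro ch hch
          rcases List.mem_cons.mp hch with h | h
          · subst h; simpa using hcur
          · exact hacc ch h
        · simp
      · have hc : c ≠ '.' := by
          intro h; subst h; simp [List.isPrefixOf] at hp
        simp only [hp, if_false, Bool.false_eq_true]
        apply ih rest (c :: cur) acc (by simp at hlen ⊢; omega) hacc
        intro h
        rcases List.mem_cons.mp h with h | h
        · exact hc h.symm
        · exact hcur h

lemma splitOn_nodot (cs : List Char) : ∀ ch ∈ PySem.Chars.splitOn cs ['.'], '.' ∉ ch := by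
  rw [PySem.Chars.splitOn]
  exact go_nodot _ _ _ _ (by omega) (by simp) (by simp)

-- every element A's loop ever holds ends in a non-dot character (or is empty)
lemma aStep_no_dot_end (rs : List String) : ∀ (s : PySem.Set String) (l : String),
    (∀ token ∈ rs, '.' ∉ token.toList) → l.toList.getLast? ≠ some '.' →
    (∀ x ∈ s, x.toList.getLast? ≠ some '.') →
    ∀ x ∈ (rs.foldl aStep (s, l)).1, x.toList.getLast? ≠ some '.' := by
  induction rs with
  | nil => intro s l _ _ hs; simpa using hs
  | cons r rest ih =>
    intro s l hrs hl hs
    have hr : r.toList.getLast? ≠ some '.' := by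
      intro h
      exact hrs r (by simp) (List.mem_of_getLast? h)
    by_cases hle : l = ""
    · subst hle
      simp only [List.foldl_cons, aStep, BEq.rfl, if_pos]
      apply ih _ _ (fun t ht => hrs t (by simp [ht])) hr
      intro x hx
      rcases (PySem.Set.mem_add _ _ _).mp hx with h | h
      · exact hs x h
      · subst h; exact hr
    · have hlne : l.toList ≠ [] := fun h => hle (String.toList_inj.mp (by simp [h]))
      have hcat : (r ++ "." ++ l).toList.getLast? ≠ some '.' := by
        have : (r ++ "." ++ l).toList = (r.toList ++ '.' :: []) ++ l.toList := by simp
        rw [this, List.getLast?_append_of_ne_nil _ hlne]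
        exact hl
      have hstep : aStep (s, l) r = (PySem.Set.add s (r ++ "." ++ l), r ++ "." ++ l) := by
        simp [aStep, hle]
      simp only [List.foldl_cons, hstep]
      apply ih _ _ (fun t ht => hrs t (by simp [ht])) hcat
      intro x hx
      rcases (PySem.Set.mem_add _ _ _).mp hx with h | h
      · exact hs x h
      · subst h; exact hcat

-- the full name is always a member of B's result
lemma b_mem_full (ts : List String) (hts : ts ≠ []) :
    PySem.Str.join "." ts ∈
      (PySem.List.pyRange ((ts.length : Int) - 1) (-1) (-1)).foldl (bAdd ts) PySem.Set.empty := by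
  have hb : bAdd ts = fun s i =>
      PySem.Set.add s (PySem.Str.join "." (PySem.List.slice ts (some i) none)) := rfl
  rw [hb]
  apply (PySem.Set.mem_foldl_add _ _ _ _).mpr
  right
  refine ⟨0, ?_, ?_⟩
  · rw [PySem.List.mem_pyRange_neg_one]
    have : 0 < ts.length := List.length_pos_iff.mpr hts
    omega
  · rw [PySem.List.slice_from (ha := by omega)]
    simp

-- ===== VERDICT (by name: the statement is the Claim_ definition above) =====
theorem generate_unique_names_py_spec : Claim_unchanged_generate_unique_names_py := by
  intro input_name _ hnD
  by_cases h0 : input_name = ""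
  · subst h0; decide
  · have hne : input_name.toList ≠ [] := fun h => h0 (String.toList_inj.mp (by simp [h]))
    have hlast : input_name.toList.getLast? ≠ some '.' := by
      intro h
      apply hnD
      unfold D_generate_unique_names_py
      rw [PySem.Str.endswith]
      rw [PySem.Chars.endswith_iff]
      exact getLast?_suffix _ _ h
    obtain ⟨us0, t0, hsplit, ht0⟩ := splitOn_last input_name.toList hne hlast
    have ht : String.ofList t0 ≠ "" := by
      intro h
      apply ht0
      have := congrArg String.toList h
      rwa [String.toList_ofList] at this
    show (_ : List String) = _
    rw [generate_unique_names_py, generate_unique_names_py_alt]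
    simp only [hsplit, List.map_append, List.map_cons, List.map_nil]
    rw [a_fold_eq (us0.map String.ofList) (String.ofList t0) ht,
      b_fold_eq (us0.map String.ofList ++ [String.ofList t0])]

theorem generate_unique_names_py_changed : Claim_changed_generate_unique_names_py := by
  unfold Claim_changed_generate_unique_names_py; decide

theorem generate_unique_names_py_tight : Claim_exact_generate_unique_names_py := by
  intro input_name _ hD heq
  have hsfx : ['.'] <:+ input_name.toList := by
    unfold D_generate_unique_names_py at hD
    rw [PySem.Str.endswith, PySem.Chars.endswith_iff] at hD
    exact hD
  have hlast : input_name.toList.getLast? = some '.' := by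
    obtain ⟨pre, hpre⟩ := hsfx
    rw [← hpre]
    simp [List.getLast?_append]
  have hchunks := splitOn_nodot input_name.toList
  have htok_nodot : ∀ token ∈ ((PySem.Chars.splitOn input_name.toList ['.']).map String.ofList).reverse,
      '.' ∉ token.toList := by
    intro token ht
    rw [List.mem_reverse, List.mem_map] at ht
    obtain ⟨ch, hch, rfl⟩ := ht
    rw [String.toList_ofList]
    exact hchunks ch hch
  have hts_ne : ((PySem.Chars.splitOn input_name.toList ['.']).map String.ofList) ≠ [] := by
    simp [splitOn_ne_nil]
  have hjoin : PySem.Str.join "." ((PySem.Chars.splitOn input_name.toList ['.']).map String.ofList)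
      = input_name := by
    apply String.toList_inj.mp
    rw [PySem.Str.toList_join]
    rw [List.map_map]
    have hm : (String.toList ∘ String.ofList) = id := by
      funext cs; simp
    rw [hm, List.map_id]
    exact splitOn_join input_name.toList
  have hmem : input_name ∈ generate_unique_names_py_alt input_name := by
    rw [generate_unique_names_py_alt]
    have := b_mem_full ((PySem.Chars.splitOn input_name.toList ['.']).map String.ofList) hts_ne
    rwa [hjoin] at this
  rw [← heq] at hmem
  have hA : ∀ x ∈ generate_unique_names_py input_name, x.toList.getLast? ≠ some '.' := by
    rw [generate_unique_names_py]
    exact aStep_no_dot_end _ _ _ htok_nodot (by simp) (by simp)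
  exact hA input_name hmem hlast
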